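-- pv_equiv track=rewrite | github.com/000alen/nChess | nChess/nBoard/__init__.py | compute_basis
-- ===== SOURCE A (Python) =====
-- IntegerVector = tuple[int, ...]
--
-- def compute_basis(dimension: int) -> tuple[IntegerVector, ...]:
--     return tuple(
--         tuple(
--             1 if i == j
--             else 0
--             for j in range(dimension)
--         )
--         for i in range(dimension)
--     )
-- ===== SOURCE B (Python) =====
-- def compute_basis(dimension: int) -> tuple:
--     if dimension <= 0:
--         return ()
--     row = (1,) + (0,) * (dimension - 1)
--     rows = []
--     for _ in range(dimension):
--         rows.append(row)
--         row = row[-1:] + row[:-1]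
--     return tuple(rows)
-- ===== Notes on version B (the rewrite author's own statement) =====
-- stated objective: alternative
-- what changed: B generates the basis by cyclic rotation: it builds only the first basis vector (1,0,...,0) and obtains every subsequent row by rotating the previous row right by one position (row[-1:] + row[:-1]), instead of A's doubly-nested comprehension that tests i==j for every (i,j) pair.
import Mathlib
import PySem

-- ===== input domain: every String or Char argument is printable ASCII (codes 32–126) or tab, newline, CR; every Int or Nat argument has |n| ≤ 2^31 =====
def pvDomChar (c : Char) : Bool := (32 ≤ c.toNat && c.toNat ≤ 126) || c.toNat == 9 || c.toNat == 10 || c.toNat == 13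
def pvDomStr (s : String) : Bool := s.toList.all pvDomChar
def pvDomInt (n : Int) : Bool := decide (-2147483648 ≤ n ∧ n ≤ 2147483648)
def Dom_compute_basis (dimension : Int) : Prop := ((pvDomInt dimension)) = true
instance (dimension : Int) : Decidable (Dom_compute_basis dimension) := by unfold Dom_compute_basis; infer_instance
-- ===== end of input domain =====

-- B generates the basis by cyclic rotation of the first basis vector instead of A's per-entry i==j test (alternative algorithm, same cost).

-- ===== PORT A =====
def compute_basis (dimension : Int) : List (List Int) :=
  (PySem.List.pyRange 0 dimension 1).map (fun i =>
    (PySem.List.pyRange 0 dimension 1).map (fun j => if i == j then 1 else 0))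

-- ===== PORT B =====
-- row[-1:] + row[:-1]  (rotate right by one)
def rotRight (row : List Int) : List Int :=
  PySem.List.slice row (some (-1)) none ++ PySem.List.slice row none (some (-1))

-- the loop body of B: append the current row, then rotate it
def rotStep (st : List (List Int) × List Int) (_ : Int) : List (List Int) × List Int :=
  (st.1 ++ [st.2], rotRight st.2)

def compute_basis_alt (dimension : Int) : List (List Int) :=
  if dimension ≤ 0 then []
  else
    ((PySem.List.pyRange 0 dimension 1).foldl rotStep
      ([], 1 :: List.replicate (dimension - 1).toNat 0)).1

-- ===== PRECONDITION & SPEC =====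
def Spec_compute_basis (dimension : Int) (out : List (List Int)) : Prop := out = compute_basis_alt dimension
instance (dimension : Int) (out : List (List Int)) : Decidable (Spec_compute_basis dimension out) := by unfold Spec_compute_basis; infer_instance

-- ===== CLAIM (what is proved, stated in full; the proofs are below) =====
def Claim_equal_compute_basis : Prop := ∀ (dimension : Int), Dom_compute_basis dimension → Spec_compute_basis dimension (compute_basis dimension)

-- ===== LEMMAS AND PROOFS =====

-- the k-th standard basis row of dimension n
def rowFn (n k : Nat) : List Int := List.replicate k 0 ++ 1 :: List.replicate (n - 1 - k) 0

theorem rowA (n i : Nat) (hi : i < n) :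
    (List.range n).map (fun j => if i = j then (1:Int) else 0) = rowFn n i := by
  apply List.ext_getElem
  · simp [rowFn]; omega
  · intro k h1 h2
    simp only [List.getElem_map, List.getElem_range, rowFn]
    rcases lt_trichotomy k i with h | h | h
    · rw [List.getElem_append_left (by simpa using h)]
      simp [h.ne']
    · subst h; rw [List.getElem_append_right (by simp)]; simp
    · rw [List.getElem_append_right (by simpa using h.le)]
      have hk : k - i ≠ 0 := by omega
      rcases Nat.exists_eq_succ_of_ne_zero hk with ⟨t, ht⟩
      simp only [List.length_replicate, ht, List.getElem_cons_succ, List.getElem_replicate]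
      simp [h.ne]

theorem rot_row (n k : Nat) (hk : k + 1 < n) :
    rotRight (rowFn n k) = rowFn n (k + 1) := by
  have hm : n - 1 - k = (n - 2 - k) + 1 := by omega
  set m := n - 2 - k with hmdef
  have hsplit : rowFn n k = (List.replicate k (0:Int) ++ 1 :: List.replicate m 0) ++ [0] := by
    simp [rowFn, hm, List.replicate_succ' (n := m)]
  unfold rotRight
  rw [hsplit, PySem.List.slice_from_neg_one, PySem.List.slice_to_neg_one,
    List.dropLast_concat]
  have hlen : ((List.replicate k (0:Int) ++ 1 :: List.replicate m 0) ++ [0]).length - 1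
      = (List.replicate k (0:Int) ++ 1 :: List.replicate m 0).length := by simp
  rw [hlen, List.drop_left]
  have : n - 1 - (k + 1) = m := by omega
  simp [rowFn, this, List.replicate_succ]

theorem foldl_inv (n : Nat) : ∀ (l : List Int) (m : Nat), m + l.length = n →
    (l.foldl rotStep ((List.range m).map (rowFn n), rowFn n m)).1
      = (List.range n).map (rowFn n) := by
  intro l
  induction l with
  | nil => intro m hm; simp at hm; simp [hm]
  | cons x xs ih =>
    intro m hm
    cases xs with
    | nil =>
      have hn1 : n = m + 1 := by simp at hm; omega
      subst hn1
      simp [List.foldl, rotStep, List.range_succ]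
    | cons y ys =>
      have h1 : m + 1 < n := by simp at hm; omega
      have step : rotStep ((List.range m).map (rowFn n), rowFn n m) x
          = ((List.range (m+1)).map (rowFn n), rowFn n (m+1)) := by
        simp [rotStep, List.range_succ, rot_row n m h1]
      have h2 : (m + 1) + (y :: ys).length = n := by simp at hm ⊢; omega
      simpa [List.foldl, step] using ih (m + 1) h2

theorem compute_basis_spec : Claim_equal_compute_basis := by
  intro d _
  unfold Spec_compute_basis compute_basis compute_basis_alt
  by_cases hd : d ≤ 0
  · simp [hd, PySem.List.pyRange_one_eq_nil (by omega : d ≤ 0)]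
  · push Not at hd
    simp only [if_neg (by omega : ¬ d ≤ 0)]
    set n := d.toNat with hn
    have hinit : (1 :: List.replicate (d - 1).toNat (0:Int)) = rowFn n 0 := by
      simp [rowFn]; omega
    have hlen : (PySem.List.pyRange 0 d 1).length = n := by
      simp [PySem.List.length_pyRange_one, hn]
    have hB : ((PySem.List.pyRange 0 d 1).foldl rotStep
        ([], 1 :: List.replicate (d - 1).toNat 0)).1 = (List.range n).map (rowFn n) := by
      have := foldl_inv n (PySem.List.pyRange 0 d 1) 0 (by simp [hlen])
      simpa [hinit] using this
    rw [hB, PySem.List.pyRange_one]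
    simp only [Int.sub_zero, List.map_map, ← hn]
    apply List.map_congr_left
    intro i hi
    rw [List.mem_range] at hi
    have hrw : (List.range n).map ((fun j => if ((0:Int) + i == j) then (1:Int) else 0) ∘ (fun k : Nat => (0:Int) + k))
        = (List.range n).map (fun j : Nat => if i = j then (1:Int) else 0) := by
      apply List.map_congr_left; intro j _
      simp [Function.comp, beq_iff_eq]
    simpa [Function.comp] using hrw.trans (rowA n i hi)
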